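-- pv_equiv track=rewrite | github.com/larinza/Fundamentos-de-Linguagem-de-Programa-o | 03-sintaticaEsemantica/exemplo_python.py | analisar_lexicamente_shopsript
-- ===== SOURCE A (Python) =====
-- def analisar_lexicamente_shopsript(comando_shopsript):
--     palavras_chave = [
--         "INICIO", "FIM", "lista_compras", "adicionar_item", "remover_item",
--         "adicionar_unidade", "decrementar_unidade", "marcar_pronto",
--         "desmarcar_pronto", "lista_total_itens", "exibir_lista_compras",
--         "exibir_lista_total_itens", "marcar_esgotado", "desmarcar_esgotado"
--     ]
--     delimitadores = ['(', ')', ',', ';']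
--
--     tokens_mapeados = {
--         '(': 'DELIMITADOR_ABRE_PARENTESES',
--         ')': 'DELIMITADOR_FECHA_PARENTESES',
--         ',': 'DELIMITADOR_VIRGULA',
--         ';': 'DELIMITADOR_PONTO_E_VIRGULA'
--     }
--
--     tokens = []
--
--     for delim in delimitadores:
--         comando_shopsript = comando_shopsript.replace(delim, f' {delim} ')
--
--     partes = comando_shopsript.split()
--
--     for parte in partes:
--         if parte in palavras_chave:
--             tokens.append((parte, f'PALAVRA_CHAVE_{parte.upper()}'))
--         elif parte in tokens_mapeados:
--             tokens.append((parte, tokens_mapeados[parte]))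
--         elif parte.startswith('"') and parte.endswith('"'):
--             tokens.append((parte, 'LITERAL_TEXTO'))
--         elif parte.isdigit():
--             tokens.append((parte, 'NUMERO_INTEIRO'))
--         else:
--             tokens.append((parte, 'IDENTIFICADOR'))
--
--     return tokens
-- ===== SOURCE B (Python) =====
-- def analisar_lexicamente_shopsript(comando_shopsript):
--     palavras_chave = [
--         "INICIO", "FIM", "lista_compras", "adicionar_item", "remover_item",
--         "adicionar_unidade", "decrementar_unidade", "marcar_pronto",
--         "desmarcar_pronto", "lista_total_itens", "exibir_lista_compras",
--         "exibir_lista_total_itens", "marcar_esgotado", "desmarcar_esgotado"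
--     ]
--     tokens_mapeados = {
--         '(': 'DELIMITADOR_ABRE_PARENTESES',
--         ')': 'DELIMITADOR_FECHA_PARENTESES',
--         ',': 'DELIMITADOR_VIRGULA',
--         ';': 'DELIMITADOR_PONTO_E_VIRGULA'
--     }
--
--     def classificar(parte):
--         if parte in palavras_chave:
--             return f'PALAVRA_CHAVE_{parte.upper()}'
--         elif parte in tokens_mapeados:
--             return tokens_mapeados[parte]
--         elif parte.startswith('"') and parte.endswith('"'):
--             return 'LITERAL_TEXTO'
--         elif parte.isdigit():
--             return 'NUMERO_INTEIRO'
--         else: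
--             return 'IDENTIFICADOR'
--
--     tokens = []
--     palavra = []
--
--     def despejar():
--         if palavra:
--             p = ''.join(palavra)
--             tokens.append((p, classificar(p)))
--             palavra.clear()
--
--     for ch in comando_shopsript:
--         if ch in tokens_mapeados:
--             despejar()
--             tokens.append((ch, classificar(ch)))
--         elif ch.isspace():
--             despejar()
--         else:
--             palavra.append(ch)
--     despejar()
--     return tokens
-- ===== Notes on version B (the rewrite author's own statement) =====
-- stated objective: alternative
-- what changed: B replaces A's four whole-string .replace passes followed by .split() with a single character-by-character scan that emits delimiter tokens and flushes accumulated words as it goes, classifying each token with the same if/elif chain; it trades A's C-level string passes for one explicit linear scan.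
import Mathlib
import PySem

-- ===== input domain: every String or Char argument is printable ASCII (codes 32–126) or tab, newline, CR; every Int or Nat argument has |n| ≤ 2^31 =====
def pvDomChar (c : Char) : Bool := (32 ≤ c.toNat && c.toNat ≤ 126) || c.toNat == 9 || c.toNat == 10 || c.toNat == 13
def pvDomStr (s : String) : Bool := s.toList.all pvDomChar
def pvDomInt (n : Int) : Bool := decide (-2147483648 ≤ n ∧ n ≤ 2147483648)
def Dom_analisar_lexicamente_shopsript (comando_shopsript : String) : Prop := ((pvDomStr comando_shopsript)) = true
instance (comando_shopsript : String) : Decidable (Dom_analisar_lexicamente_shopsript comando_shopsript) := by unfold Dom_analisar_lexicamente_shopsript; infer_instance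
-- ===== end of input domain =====

-- B replaces A's four whole-string replace passes + split() by a single character-by-character scan
-- (same per-token classification chain); an alternative one-pass tokenizer, proved equal on every input string.

-- ===== PORT A =====
-- the two literal tables of the Python source (both programs carry the same tables)
def pvPalavrasChave : List String := [
    "INICIO", "FIM", "lista_compras", "adicionar_item", "remover_item",
    "adicionar_unidade", "decrementar_unidade", "marcar_pronto",
    "desmarcar_pronto", "lista_total_itens", "exibir_lista_compras",
    "exibir_lista_total_itens", "marcar_esgotado", "desmarcar_esgotado"]

def pvTokensMapeados : PySem.Dict String String :=
  ((((PySem.Dict.empty).insert "(" "DELIMITADOR_ABRE_PARENTESES").insert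
      ")" "DELIMITADOR_FECHA_PARENTESES").insert
      "," "DELIMITADOR_VIRGULA").insert
      ";" "DELIMITADOR_PONTO_E_VIRGULA"

def analisar_lexicamente_shopsript (comando_shopsript : String) : List (String × String) :=
  let delimitadores : List String := ["(", ")", ",", ";"]
  -- for delim in delimitadores: comando = comando.replace(delim, f' {delim} ')
  let comando := delimitadores.foldl
    (fun acc delim => PySem.Str.replace acc delim (String.ofList (' ' :: (delim.toList ++ [' '])))) comando_shopsript
  let partes := PySem.Str.split₀ comando
  partes.foldl (fun tokens parte =>
    if parte ∈ pvPalavrasChave then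
      tokens ++ [(parte, String.ofList ("PALAVRA_CHAVE_".toList ++ (PySem.Str.upper parte).toList))]
    else if pvTokensMapeados.contains parte then
      tokens ++ [(parte, pvTokensMapeados.getD parte "")]
    else if PySem.Str.startswith parte "\"" && PySem.Str.endswith parte "\"" then
      tokens ++ [(parte, "LITERAL_TEXTO")]
    else if PySem.Str.strIsdigit parte then
      tokens ++ [(parte, "NUMERO_INTEIRO")]
    else
      tokens ++ [(parte, "IDENTIFICADOR")]) []

-- ===== PORT B =====
-- B's helper classificar(parte): the same classification chain as A's, as a named function
def pvClassificar (parte : String) : String :=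
  if parte ∈ pvPalavrasChave then
    String.ofList ("PALAVRA_CHAVE_".toList ++ (PySem.Str.upper parte).toList)
  else if pvTokensMapeados.contains parte then
    pvTokensMapeados.getD parte ""
  else if PySem.Str.startswith parte "\"" && PySem.Str.endswith parte "\"" then
    "LITERAL_TEXTO"
  else if PySem.Str.strIsdigit parte then
    "NUMERO_INTEIRO"
  else
    "IDENTIFICADOR"

-- B's despejar(): flush the accumulated word (if any) as one classified token
def pvDespejar (palavra : List Char) (tokens : List (String × String)) : List (String × String) :=
  if palavra.isEmpty then tokens
  else tokens ++ [(String.ofList palavra, pvClassificar (String.ofList palavra))]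

-- B's single scan over the characters
def pvScan : List Char → List Char → List (String × String) → List (String × String)
  | [], palavra, tokens => pvDespejar palavra tokens
  | ch :: rest, palavra, tokens =>
    if pvTokensMapeados.contains (String.ofList [ch]) then
      pvScan rest [] (pvDespejar palavra tokens ++
        [(String.ofList [ch], pvClassificar (String.ofList [ch]))])
    else if PySem.Chars.isspace ch then
      pvScan rest [] (pvDespejar palavra tokens)
    else
      pvScan rest (palavra ++ [ch]) tokens

def analisar_lexicamente_shopsript_alt (comando_shopsript : String) : List (String × String) :=
  pvScan comando_shopsript.toList [] []

-- ===== PRECONDITION & SPEC =====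
def Spec_analisar_lexicamente_shopsript (comando_shopsript : String) (out : List (String × String)) : Prop := out = analisar_lexicamente_shopsript_alt comando_shopsript
instance (comando_shopsript : String) (out : List (String × String)) : Decidable (Spec_analisar_lexicamente_shopsript comando_shopsript out) := by unfold Spec_analisar_lexicamente_shopsript; infer_instance

-- ===== CLAIM (what is proved, stated in full; the proofs are below) =====
def Claim_equal_analisar_lexicamente_shopsript : Prop := ∀ (comando_shopsript : String), Dom_analisar_lexicamente_shopsript comando_shopsript → Spec_analisar_lexicamente_shopsript comando_shopsript (analisar_lexicamente_shopsript comando_shopsript)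

-- ===== LEMMAS AND PROOFS =====

-- proof-side: is c one of the four delimiter characters?
def pvIsDelim (c : Char) : Bool := c == '(' || c == ')' || c == ',' || c == ';'

-- proof-side: the per-character expansion the four replace passes amount to
def pvExpand (c : Char) : List Char := if pvIsDelim c then [' ', c, ' '] else [c]

-- proof-side: the word stream both programs tokenize (words as char lists, current word carried forward)
def pvParts : List Char → List Char → List (List Char)
  | [], cur => if cur.isEmpty then [] else [cur]
  | c :: rest, cur =>
    if pvIsDelim c then
      (if cur.isEmpty then [] else [cur]) ++ [c] :: pvParts rest []
    else if PySem.Chars.isspace c then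
      (if cur.isEmpty then [] else [cur]) ++ pvParts rest []
    else
      pvParts rest (cur ++ [c])

-- the classified token a part becomes
def pvTok (p : List Char) : String × String := (String.ofList p, pvClassificar (String.ofList p))

theorem pvOfList_single_eq (c a : Char) : (String.ofList [c] == String.ofList [a]) = (c == a) := by
  rcases Decidable.em (c = a) with h | h
  · simp [h]
  · simp [h, String.ext_iff]

theorem pvContains_single (c : Char) :
    pvTokensMapeados.contains (String.ofList [c]) = pvIsDelim c := by
  show ((String.ofList ['('] == String.ofList [c]) || ((String.ofList [')'] == String.ofList [c]) || ((String.ofList [','] == String.ofList [c]) || ((String.ofList [';'] == String.ofList [c]) || false)))) = _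
  rw [pvOfList_single_eq, pvOfList_single_eq, pvOfList_single_eq, pvOfList_single_eq]
  simp only [pvIsDelim, Bool.or_false]
  cases h1 : '(' == c <;> cases h2 : ')' == c <;> cases h3 : ',' == c <;> cases h4 : ';' == c <;>
    simp_all [BEq.comm]

theorem pvDespejar_eq (palavra : List Char) (tokens : List (String × String)) :
    pvDespejar palavra tokens = tokens ++ (if palavra.isEmpty then [] else [palavra]).map pvTok := by
  cases h : palavra.isEmpty <;> simp [pvDespejar, pvTok, h]

theorem pvScan_eq_parts (cs : List Char) : ∀ cur tokens,
    pvScan cs cur tokens = tokens ++ (pvParts cs cur).map pvTok := by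
  induction cs with
  | nil =>
    intro cur tokens
    rw [pvScan, pvDespejar_eq, pvParts]
  | cons c rest ih =>
    intro cur tokens
    rw [pvScan, pvContains_single, pvParts]
    by_cases hd : pvIsDelim c
    · simp only [hd, if_true]
      rw [ih, pvDespejar_eq]
      simp [pvTok]
    · simp only [hd, Bool.false_eq_true, if_false]
      by_cases hs : PySem.Chars.isspace c
      · simp only [hs, if_true]
        rw [ih, pvDespejar_eq]
        simp
      · simp only [hs, Bool.false_eq_true, if_false]
        rw [ih]

theorem pvReplace_go (c : Char) (new : List Char) :
    ∀ (fuel : Nat) (l acc : List Char), l.length ≤ fuel →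
      PySem.Chars.replace.go [c] new fuel l acc
        = acc.reverse ++ l.flatMap (fun x => if x = c then new else [x]) := by
  intro fuel
  induction fuel with
  | zero =>
    intro l acc h
    have : l = [] := List.eq_nil_of_length_eq_zero (Nat.le_zero.mp h)
    subst this
    simp [PySem.Chars.replace.go]
  | succ n ih =>
    intro l acc h
    cases l with
    | nil => simp [PySem.Chars.replace.go]
    | cons x t =>
      rcases Decidable.em (x = c) with hx | hx
      · subst hx
        rw [PySem.Chars.replace.go]
        simp only [List.isPrefixOf, beq_self_eq_true, Bool.true_and, if_true]
        rw [ih _ _ (by simpa using Nat.le_of_succ_le_succ h)]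
        simp
      · rw [PySem.Chars.replace.go]
        have : ([c].isPrefixOf (x :: t)) = false := by
          simp [List.isPrefixOf]
          exact fun hh => (hx hh.symm).elim
        rw [this]
        simp only [Bool.false_eq_true, if_false]
        rw [ih _ _ (by simpa using Nat.le_of_succ_le_succ h)]
        simp [hx]

theorem pvReplace_single (c : Char) (new s : List Char) :
    PySem.Chars.replace s [c] new = s.flatMap (fun x => if x = c then new else [x]) := by
  rw [PySem.Chars.replace]
  simp only [List.isEmpty_cons, Bool.false_eq_true, if_false]
  exact (pvReplace_go c new s.length s [] (le_refl _)).trans (by simp)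

theorem pvFlatMap_ext {α β : Type} (l : List α) (f g : α → List β) (h : ∀ x, f x = g x) :
    l.flatMap f = l.flatMap g := by
  rw [funext h]

theorem pvExpand_eq (s : String) :
    (["(", ")", ",", ";"].foldl
      (fun acc delim => PySem.Str.replace acc delim (String.ofList (' ' :: (delim.toList ++ [' '])))) s).toList
      = s.toList.flatMap pvExpand := by
  have h1 : ("(" : String).toList = ['('] := rfl
  have h2 : (")" : String).toList = [')'] := rfl
  have h3 : ("," : String).toList = [','] := rfl
  have h4 : (";" : String).toList = [';'] := rfl
  simp only [List.foldl_cons, List.foldl_nil, PySem.Str.replace, String.toList_ofList, h1, h2, h3, h4]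
  rw [pvReplace_single, pvReplace_single, pvReplace_single, pvReplace_single,
    List.flatMap_assoc, List.flatMap_assoc, List.flatMap_assoc]
  apply pvFlatMap_ext
  intro x
  by_cases e1 : x = '('
  · subst e1; decide
  by_cases e2 : x = ')'
  · subst e2; decide
  by_cases e3 : x = ','
  · subst e3; decide
  by_cases e4 : x = ';'
  · subst e4; decide
  simp [e1, e2, e3, e4, pvExpand, pvIsDelim]

theorem pvDelim_not_space {c : Char} (h : pvIsDelim c = true) : PySem.Chars.isspace c = false := by
  simp only [pvIsDelim, Bool.or_eq_true, beq_iff_eq] at h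
  rcases h with ((h | h) | h) | h <;> subst h <;> decide

theorem pvSplit_expand (cs : List Char) : ∀ cur acc,
    PySem.Chars.split₀.go (cs.flatMap pvExpand) cur acc
      = acc.reverse ++ pvParts cs cur.reverse := by
  induction cs with
  | nil =>
    intro cur acc
    simp only [List.flatMap_nil, PySem.Chars.split₀.go, pvParts]
    cases hc : cur.isEmpty
    · simp [hc]
    · simp_all
  | cons c rest ih =>
    intro cur acc
    simp only [List.flatMap_cons, pvExpand]
    by_cases hd : pvIsDelim c
    · simp only [hd, if_true]
      have hs := pvDelim_not_space hd
      show PySem.Chars.split₀.go (' ' :: (c :: ' ' :: (rest.flatMap pvExpand))) cur acc = _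
      rw [PySem.Chars.split₀.go]
      simp only [show PySem.Chars.isspace ' ' = true from rfl, if_true]
      cases hc : cur.isEmpty
      · simp only [Bool.false_eq_true, if_false]
        rw [PySem.Chars.split₀.go]
        simp only [hs, Bool.false_eq_true, if_false]
        rw [PySem.Chars.split₀.go]
        simp only [show PySem.Chars.isspace ' ' = true from rfl, if_true]
        simp only [List.isEmpty_cons, Bool.false_eq_true, if_false]
        rw [ih]
        simp [pvParts, hd, hc]
      · simp only [if_true]
        rw [PySem.Chars.split₀.go]
        simp only [hs, Bool.false_eq_true, if_false]
        rw [PySem.Chars.split₀.go]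
        simp only [show PySem.Chars.isspace ' ' = true from rfl, if_true]
        simp only [List.isEmpty_cons, Bool.false_eq_true, if_false]
        rw [ih]
        simp [pvParts, hd, hc]
    · simp only [hd, Bool.false_eq_true, if_false]
      by_cases hs : PySem.Chars.isspace c
      · show PySem.Chars.split₀.go (c :: rest.flatMap pvExpand) cur acc = _
        rw [PySem.Chars.split₀.go]
        simp only [hs, if_true]
        cases hc : cur.isEmpty
        · simp only [Bool.false_eq_true, if_false]
          rw [ih]
          simp [pvParts, hd, hs, hc]
        · simp only [if_true]
          rw [ih]
          simp [pvParts, hd, hs, hc]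
      · show PySem.Chars.split₀.go (c :: rest.flatMap pvExpand) cur acc = _
        rw [PySem.Chars.split₀.go]
        simp only [hs, Bool.false_eq_true, if_false]
        rw [ih]
        simp [pvParts, hd, hs]

theorem pvSplit₀_expand (s : String) :
    PySem.Chars.split₀ (s.toList.flatMap pvExpand) = pvParts s.toList [] := by
  rw [PySem.Chars.split₀, pvSplit_expand]
  rfl

theorem pvBody_eq (tokens : List (String × String)) (parte : String) :
    (if parte ∈ pvPalavrasChave then
      tokens ++ [(parte, String.ofList ("PALAVRA_CHAVE_".toList ++ (PySem.Str.upper parte).toList))]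
    else if pvTokensMapeados.contains parte then
      tokens ++ [(parte, pvTokensMapeados.getD parte "")]
    else if PySem.Str.startswith parte "\"" && PySem.Str.endswith parte "\"" then
      tokens ++ [(parte, "LITERAL_TEXTO")]
    else if PySem.Str.strIsdigit parte then
      tokens ++ [(parte, "NUMERO_INTEIRO")]
    else
      tokens ++ [(parte, "IDENTIFICADOR")])
    = tokens ++ [(parte, pvClassificar parte)] := by
  simp only [pvClassificar]
  split_ifs <;> rfl

theorem pvMain (s : String) :
    analisar_lexicamente_shopsript s = analisar_lexicamente_shopsript_alt s := by
  show (PySem.Str.split₀ _).foldl _ [] = _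
  rw [PySem.Str.split₀, pvExpand_eq, pvSplit₀_expand]
  have hb : (fun (tokens : List (String × String)) (parte : String) =>
      if parte ∈ pvPalavrasChave then
        tokens ++ [(parte, String.ofList ("PALAVRA_CHAVE_".toList ++ (PySem.Str.upper parte).toList))]
      else if pvTokensMapeados.contains parte then
        tokens ++ [(parte, pvTokensMapeados.getD parte "")]
      else if PySem.Str.startswith parte "\"" && PySem.Str.endswith parte "\"" then
        tokens ++ [(parte, "LITERAL_TEXTO")]
      else if PySem.Str.strIsdigit parte then
        tokens ++ [(parte, "NUMERO_INTEIRO")]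
      else
        tokens ++ [(parte, "IDENTIFICADOR")])
      = fun tokens parte => tokens ++ [(parte, pvClassificar parte)] := by
    funext tokens parte
    exact pvBody_eq tokens parte
  rw [hb, PySem.List.foldl_append_singleton_eq_map]
  rw [analisar_lexicamente_shopsript_alt, pvScan_eq_parts]
  simp [List.map_map, pvTok, Function.comp]

-- ===== VERDICT (by name: the statement is the Claim_ definition above) =====
theorem analisar_lexicamente_shopsript_spec : Claim_equal_analisar_lexicamente_shopsript := by
  intro s _
  exact pvMain s
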